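-- pv_equiv track=rewrite | github.com/lqueryvg/advent2024 | day22/p1.py | go
-- ===== SOURCE A (Python) =====
-- ITERATIONS = 2000
--
-- def evolveSecret(num):
--   num = ((num * 64) ^ num) % 16777216
--   num = ((num // 32) ^ num) % 16777216
--   num = ((num * 2048) ^ num) % 16777216
--   return num
--
-- def go(nums):
--   total = 0
--   for num in nums:
--     new = num
--     for i in range(0, ITERATIONS):
--       new = evolveSecret(new)
--     total += new
--   return total
-- ===== SOURCE B (Python) =====
-- ITERATIONS = 2000
-- MOD = 16777216  # 2**24
--
-- def _evolve(num):
--     num = ((num * 64) ^ num) % MOD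
--     num = ((num // 32) ^ num) % MOD
--     num = ((num * 2048) ^ num) % MOD
--     return num
--
-- def go(nums):
--     # The evolve step is GF(2)-linear on 24-bit states: precompute once the
--     # image of each basis bit under ITERATIONS-1 steps, then each number
--     # costs one evolve step plus a 24-bit linear-map application.
--     img = []
--     v0 = 1
--     for _ in range(24):
--         v = v0
--         for _ in range(ITERATIONS - 1):
--             v = _evolve(v)
--         img.append(v)
--         v0 *= 2
--     total = 0
--     for num in nums:
--         x = _evolve(num)  # first step; brings any int into [0, MOD)
--         r = 0
--         for v in img:
--             if x % 2 == 1: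
--                 r ^= v
--             x //= 2
--         total += r
--     return total
-- ===== Notes on version B (the rewrite author's own statement) =====
-- stated objective: faster
-- what changed: B exploits that the evolve step is GF(2)-linear on 24-bit states: it precomputes once the image of each of the 24 basis bits under 1999 evolve steps, then handles each number with a single evolve step plus a 24-term XOR combination instead of 2000 evolve steps.
import Mathlib
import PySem

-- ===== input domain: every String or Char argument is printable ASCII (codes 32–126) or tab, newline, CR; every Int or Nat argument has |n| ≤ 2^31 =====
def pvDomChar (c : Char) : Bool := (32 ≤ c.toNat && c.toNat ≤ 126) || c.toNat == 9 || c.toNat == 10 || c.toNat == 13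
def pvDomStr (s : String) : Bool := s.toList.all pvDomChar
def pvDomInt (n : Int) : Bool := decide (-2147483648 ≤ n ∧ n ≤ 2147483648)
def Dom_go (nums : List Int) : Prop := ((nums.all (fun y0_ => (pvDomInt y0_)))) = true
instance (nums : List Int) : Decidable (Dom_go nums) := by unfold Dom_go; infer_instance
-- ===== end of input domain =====

-- B replaces the 2000 evolve steps per number by a precomputed GF(2)-linear map
-- (24 basis-bit images under 1999 steps) applied after one evolve step; objective: faster.


-- ===== PORT A =====
def evolveSecret (num : Int) : Int :=
  let num := PySem.Int.mod (PySem.Int.bxor (num * 64) num) 16777216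
  let num := PySem.Int.mod (PySem.Int.bxor (PySem.Int.floordiv num 32) num) 16777216
  let num := PySem.Int.mod (PySem.Int.bxor (num * 2048) num) 16777216
  num

def go (nums : List Int) : Int :=
  nums.foldl (fun total num =>
    total + (PySem.List.pyRange 0 2000 1).foldl (fun new _ => evolveSecret new) num) 0

-- ===== PORT B =====
def goAltEvolve (num : Int) : Int :=
  let num := PySem.Int.mod (PySem.Int.bxor (num * 64) num) 16777216
  let num := PySem.Int.mod (PySem.Int.bxor (PySem.Int.floordiv num 32) num) 16777216
  let num := PySem.Int.mod (PySem.Int.bxor (num * 2048) num) 16777216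
  num

def go_alt (nums : List Int) : Int :=
  let p := (PySem.List.pyRange 0 24 1).foldl
    (fun (s : List Int × Int) _ =>
      ((s.1 ++ [(PySem.List.pyRange 0 1999 1).foldl (fun v _ => goAltEvolve v) s.2]), s.2 * 2))
    ([], 1)
  let img := p.1
  nums.foldl (fun total num =>
    let x := goAltEvolve num
    let rx := img.foldl
      (fun (rx : Int × Int) v =>
        ((if PySem.Int.mod rx.2 2 = 1 then PySem.Int.bxor rx.1 v else rx.1),
         PySem.Int.floordiv rx.2 2)) (0, x)
    total + rx.1) 0

-- ===== PRECONDITION & SPEC =====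
def Spec_go (nums : List Int) (out : Int) : Prop := out = go_alt nums
instance (nums : List Int) (out : Int) : Decidable (Spec_go nums out) := by unfold Spec_go; infer_instance

-- ===== CLAIM (what is proved, stated in full; the proofs are below) =====
def Claim_equal_go : Prop := ∀ (nums : List Int), Dom_go nums → Spec_go nums (go nums)

-- ===== LEMMAS AND PROOFS =====

-- Nat-level mirror of the evolve step, split into its three substeps
def s1N (n : Nat) : Nat := ((n * 64) ^^^ n) % 16777216
def s2N (n : Nat) : Nat := ((n / 32) ^^^ n) % 16777216
def s3N (n : Nat) : Nat := ((n * 2048) ^^^ n) % 16777216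
def evN (n : Nat) : Nat := s3N (s2N (s1N n))

-- Nat-level application of a list of basis images to the bits of x
def applyBits : List Nat → Nat → Nat → Nat
  | [], r, _ => r
  | v :: vs, r, x => applyBits vs (if x % 2 = 1 then r ^^^ v else r) (x / 2)

theorem evolveSecret_natCast (n : Nat) : evolveSecret (n : Int) = ((evN n : Nat) : Int) := by
  have h64 : ((n : Int) * 64) = ((n * 64 : Nat) : Int) := by push_cast; ring
  have h2048 : ∀ m : Nat, ((m : Int) * 2048) = ((m * 2048 : Nat) : Int) := by
    intro m; push_cast; ring
  have hM : (16777216 : Int) = ((16777216 : Nat) : Int) := by norm_num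
  have h32 : (32 : Int) = ((32 : Nat) : Int) := by norm_num
  simp only [evolveSecret, evN, s1N, s2N, s3N, h64, hM, h32, h2048, PySem.Int.bxor_natCast,
    PySem.Int.mod_natCast, PySem.Int.floordiv_natCast]

theorem evolve_bound (x : Int) : 0 ≤ evolveSecret x ∧ evolveSecret x < 16777216 := by
  unfold evolveSecret
  exact ⟨PySem.Int.mod_nonneg _ (by norm_num), PySem.Int.mod_lt _ (by norm_num)⟩

theorem goAltEvolve_eq : goAltEvolve = evolveSecret := rfl

-- a for-loop that ignores its index is function iteration
theorem foldl_ignore_iterate {α : Type} (f : α → α) (l : List Int) (x : α) :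
    l.foldl (fun v _ => f v) x = f^[l.length] x := by
  induction l generalizing x with
  | nil => rfl
  | cons h t ih => simp [List.foldl, ih, Function.iterate_succ_apply]

theorem iterate_evolve_natCast (k : Nat) (n : Nat) :
    evolveSecret^[k] (n : Int) = ((evN^[k] n : Nat) : Int) := by
  induction k generalizing n with
  | zero => rfl
  | succ j ih =>
    rw [Function.iterate_succ_apply, Function.iterate_succ_apply,
      evolveSecret_natCast, ih]

-- GF(2)-linearity of the evolve step (no range condition needed)
theorem mod_M_xor (a b : Nat) : (a ^^^ b) % 16777216 = a % 16777216 ^^^ b % 16777216 := by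
  have h : (16777216 : Nat) = 2 ^ 24 := by norm_num
  rw [h]; exact Nat.xor_mod_two_pow

theorem mul64_xor (a b : Nat) : (a ^^^ b) * 64 = a * 64 ^^^ b * 64 := by
  have h : ∀ c : Nat, c * 64 = c <<< 6 := fun c => by rw [Nat.shiftLeft_eq]
  rw [h, h, h]; exact Nat.shiftLeft_xor_distrib

theorem mul2048_xor (a b : Nat) : (a ^^^ b) * 2048 = a * 2048 ^^^ b * 2048 := by
  have h : ∀ c : Nat, c * 2048 = c <<< 11 := fun c => by rw [Nat.shiftLeft_eq]
  rw [h, h, h]; exact Nat.shiftLeft_xor_distrib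

theorem div32_xor (a b : Nat) : (a ^^^ b) / 32 = a / 32 ^^^ b / 32 := by
  have h : ∀ c : Nat, c / 32 = c >>> 5 := fun c => by rw [Nat.shiftRight_eq_div_pow]
  rw [h, h, h]; exact Nat.shiftRight_xor_distrib

theorem xor4 (a b c d : Nat) : (a ^^^ b) ^^^ (c ^^^ d) = (a ^^^ c) ^^^ (b ^^^ d) := by ac_rfl

theorem s1N_linear (x y : Nat) : s1N (x ^^^ y) = s1N x ^^^ s1N y := by
  unfold s1N; rw [mul64_xor, xor4, mod_M_xor]

theorem s2N_linear (x y : Nat) : s2N (x ^^^ y) = s2N x ^^^ s2N y := by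
  unfold s2N; rw [div32_xor, xor4, mod_M_xor]

theorem s3N_linear (x y : Nat) : s3N (x ^^^ y) = s3N x ^^^ s3N y := by
  unfold s3N; rw [mul2048_xor, xor4, mod_M_xor]

theorem evN_linear (x y : Nat) : evN (x ^^^ y) = evN x ^^^ evN y := by
  unfold evN; rw [s1N_linear, s2N_linear, s3N_linear]

theorem evN_iter_linear (k : Nat) (x y : Nat) :
    evN^[k] (x ^^^ y) = evN^[k] x ^^^ evN^[k] y := by
  induction k generalizing x y with
  | zero => rfl
  | succ j ih =>
    rw [Function.iterate_succ_apply, Function.iterate_succ_apply,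
      Function.iterate_succ_apply, evN_linear, ih]

theorem linear_zero (f : Nat → Nat) (hf : ∀ a b, f (a ^^^ b) = f a ^^^ f b) : f 0 = 0 := by
  have h := hf 0 0
  simp at h
  exact h

theorem two_mul_xor_one (k : Nat) : (2 * k) ^^^ 1 = 2 * k + 1 := by
  apply Nat.eq_of_testBit_eq
  intro i
  cases i with
  | zero => simp [Nat.mul_comm 2 k]
  | succ j => simp [Nat.testBit_succ, Nat.mul_comm 2 k]

-- key decomposition: applying the basis images bit by bit computes any linear map
theorem applyBits_linear (n : Nat) (f : Nat → Nat)
    (hf : ∀ a b, f (a ^^^ b) = f a ^^^ f b) :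
    ∀ (r x : Nat), x < 2 ^ n →
      applyBits ((List.range n).map (fun b => f (2 ^ b))) r x = r ^^^ f x := by
  induction n generalizing f with
  | zero =>
    intro r x hx
    interval_cases x
    simp [applyBits, linear_zero f hf]
  | succ m ih =>
    intro r x hx
    have hxd : x / 2 < 2 ^ m := by
      have h2m : (2:Nat) ^ (m+1) = 2 * 2 ^ m := by ring
      omega
    have hcons : (List.range (m + 1)).map (fun b => f (2 ^ b)) =
        f 1 :: (List.range m).map (fun b => (fun y => f (2 * y)) (2 ^ b)) := by
      rw [List.range_succ_eq_map]
      simp [List.map_map, Function.comp_def, pow_succ, Nat.mul_comm]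
    have hf2 : ∀ a b, (fun y => f (2 * y)) (a ^^^ b) = (fun y => f (2 * y)) a ^^^ (fun y => f (2 * y)) b := by
      intro a b
      have h2 : 2 * (a ^^^ b) = (2 * a) ^^^ (2 * b) := by
        have := Nat.shiftLeft_xor_distrib (a := a) (b := b) (i := 1)
        simpa [Nat.shiftLeft_eq, Nat.mul_comm] using this
      simp only [h2, hf]
    rw [hcons]
    show applyBits _ (if x % 2 = 1 then r ^^^ f 1 else r) (x / 2) = r ^^^ f x
    rw [ih (fun y => f (2 * y)) hf2 _ _ hxd]
    by_cases hpar : x % 2 = 1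
    · have hx2 : x = (2 * (x / 2)) ^^^ 1 := by
        rw [two_mul_xor_one]; omega
      rw [if_pos hpar]
      conv_rhs => rw [hx2]
      rw [hf]
      ac_rfl
    · have hx2 : x = 2 * (x / 2) := by omega
      rw [if_neg hpar]
      conv_rhs => rw [hx2]

-- the img-building loop produces exactly the basis images (K = inner iteration count, kept symbolic)
theorem build_img_gen (K : Nat) (R : List Int) (hR : R.length = K) (L : List Int) :
    ∀ (acc : List Int) (c : Nat),
      L.foldl (fun (s : List Int × Int) _ =>
          ((s.1 ++ [R.foldl (fun v _ => goAltEvolve v) s.2]), s.2 * 2))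
        (acc, ((2 ^ c : Nat) : Int))
      = (acc ++ (List.range L.length).map (fun j => ((evN^[K] (2 ^ (c + j)) : Nat) : Int)),
         ((2 ^ (c + L.length) : Nat) : Int)) := by
  induction L with
  | nil =>
    intro acc c
    simp only [List.foldl_nil, List.length_nil, List.range_zero, List.map_nil,
      List.append_nil, Nat.add_zero]
  | cons h t ih =>
    intro acc c
    have hstep : R.foldl (fun v _ => goAltEvolve v) ((2 ^ c : Nat) : Int)
        = ((evN^[K] (2 ^ c) : Nat) : Int) := by
      rw [goAltEvolve_eq, foldl_ignore_iterate, hR, iterate_evolve_natCast]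
    have hmul : ((2 ^ c : Nat) : Int) * 2 = ((2 ^ (c + 1) : Nat) : Int) := by
      push_cast [pow_succ]; ring
    simp only [List.foldl_cons, hstep, hmul, ih]
    rw [Prod.mk.injEq]
    constructor
    · rw [List.append_assoc]
      refine congrArg (fun z => acc ++ z) ?_
      rw [List.length_cons, List.range_succ_eq_map, List.map_cons, List.map_map,
        List.singleton_append]
      refine congrArg₂ List.cons ?_ ?_
      · rw [Nat.add_zero]
      · refine List.map_congr_left ?_
        intro j _
        simp only [Function.comp_apply]
        have hj : c + (j + 1) = c + 1 + j := by omega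
        rw [hj]
    · rw [List.length_cons]
      have hcl : c + (t.length + 1) = c + 1 + t.length := by omega
      rw [hcl]

-- the per-number application loop, cast down to Nat
theorem apply_fold_natCast (bs : List Nat) :
    ∀ (r x : Nat),
      ((bs.map (fun b : Nat => (b : Int))).foldl
        (fun (rx : Int × Int) v =>
          ((if PySem.Int.mod rx.2 2 = 1 then PySem.Int.bxor rx.1 v else rx.1),
           PySem.Int.floordiv rx.2 2)) ((r : Int), (x : Int))).1
      = ((applyBits bs r x : Nat) : Int) := by
  induction bs with
  | nil => intro r x; simp [applyBits]
  | cons v vs ih =>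
    intro r x
    have h2 : (2 : Int) = ((2 : Nat) : Int) := by norm_num
    have hmod : PySem.Int.mod (x : Int) 2 = ((x % 2 : Nat) : Int) := by
      rw [h2, PySem.Int.mod_natCast]
    have hcond : (PySem.Int.mod (x : Int) 2 = 1) ↔ (x % 2 = 1) := by
      rw [hmod]; exact_mod_cast Iff.rfl
    have hdiv : PySem.Int.floordiv (x : Int) 2 = ((x / 2 : Nat) : Int) := by
      rw [h2, PySem.Int.floordiv_natCast]
    simp only [List.map_cons, List.foldl_cons, applyBits, hdiv]
    by_cases hp : x % 2 = 1
    · rw [if_pos (hcond.mpr hp), if_pos hp, PySem.Int.bxor_natCast, ih]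
    · rw [if_neg (fun h => hp (hcond.mp h)), if_neg hp, ih]

-- per-element agreement at a symbolic iteration count K
theorem per_element_gen (K : Nat) (m : Nat) (hmlt : m < 2 ^ 24) :
    ((evN^[K] m : Nat) : Int)
    = (((List.range 24).map (fun j => ((evN^[K] (2 ^ (0 + j)) : Nat) : Int))).foldl
        (fun (rx : Int × Int) v =>
          ((if PySem.Int.mod rx.2 2 = 1 then PySem.Int.bxor rx.1 v else rx.1),
           PySem.Int.floordiv rx.2 2)) (0, (m : Int))).1 := by
  have hmap : (List.range 24).map (fun j => ((evN^[K] (2 ^ (0 + j)) : Nat) : Int))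
      = ((List.range 24).map (fun b => evN^[K] (2 ^ b))).map (fun b : Nat => (b : Int)) := by
    simp only [List.map_map, Function.comp_def, Nat.zero_add]
  rw [hmap]
  have hfold := apply_fold_natCast ((List.range 24).map (fun b => evN^[K] (2 ^ b))) 0 m
  simp only [Nat.cast_zero] at hfold
  rw [hfold]
  have happ := applyBits_linear 24 (evN^[K]) (evN_iter_linear K) 0 m hmlt
  rw [Nat.zero_xor] at happ
  exact congrArg (fun z : Nat => (z : Int)) happ.symm

-- ===== VERDICT (by name: the statement is the Claim_ definition above) =====
theorem go_spec : Claim_equal_go := by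
  intro nums _
  show go nums = go_alt nums
  have hlen24 : (PySem.List.pyRange 0 24 1).length = 24 := by
    rw [PySem.List.length_pyRange_one]; rfl
  have hlen1999 : (PySem.List.pyRange 0 1999 1).length = 1999 := by
    rw [PySem.List.length_pyRange_one]; rfl
  have himg := build_img_gen 1999 (PySem.List.pyRange 0 1999 1) hlen1999
    (PySem.List.pyRange 0 24 1) [] 0
  rw [hlen24] at himg
  simp only [pow_zero, Nat.cast_one, List.nil_append] at himg
  simp only [go, go_alt, himg]
  apply PySem.List.foldl_congr_mem
  intro acc x _
  refine congrArg (fun z : Int => acc + z) ?_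
  have hlen2000 : (PySem.List.pyRange 0 2000 1).length = 2000 := by
    rw [PySem.List.length_pyRange_one]; rfl
  rw [foldl_ignore_iterate, hlen2000]
  have hsucc : (2000 : Nat) = 1999 + 1 := rfl
  rw [hsucc, Function.iterate_succ_apply]
  obtain ⟨h0, hlt⟩ := evolve_bound x
  have hmc : evolveSecret x = (((evolveSecret x).toNat : Nat) : Int) := by omega
  have hmlt : (evolveSecret x).toNat < 2 ^ 24 := by
    have hM : (16777216 : Int) = ((2 ^ 24 : Nat) : Int) := by norm_num
    omega
  rw [goAltEvolve_eq, hmc, iterate_evolve_natCast]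
  exact per_element_gen 1999 (evolveSecret x).toNat hmlt
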